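-- pv_equiv track=rewrite | github.com/ishevche/UCU_FP_labs | Lab12/task2.py | most_popular_first_letter
-- ===== SOURCE A (Python) =====
-- def most_popular_first_letter(names):
--     """
--     Finds most common first letter, amount of names on these letter,
--     amount of kids on these letter
--     :param names: dict of names
--     :return: tuple
--     >>> most_popular_first_letter({'МАКСИМ':680, 'АРТЕМ':477, \
--     'МАТВІЙ':816, 'bgv':100})
--     ('М', 2, 1496)
--     """
--     ans_dict = {}
--     for name, amount in names.items():
--         amount_names = ans_dict.get(name[0], (0, 0))[0]
--         amount_kids = ans_dict.get(name[0], (0, 0))[1]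
--         ans_dict[name[0]] = amount_names + 1, amount_kids + amount
--     ans_list = list(ans_dict.items())
--     list.sort(ans_list, key=lambda x: x[1][0], reverse=True)
--     return ans_list[0][0], ans_list[0][1][0], ans_list[0][1][1]
-- ===== SOURCE B (Python) =====
-- def most_popular_first_letter(names):
--     """
--     Finds most common first letter, amount of names on these letter,
--     amount of kids on these letter
--     :param names: dict of names
--     :return: tuple
--     """
--     items = list(names.items())
--     best = None
--     seen = set()
--     for name, _ in items:
--         letter = name[0]
--         if letter in seen:
--             continue
--         seen.add(letter)
--         cnt = sum(1 for n, _ in items if n[0] == letter)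
--         kids = sum(a for n, a in items if n[0] == letter)
--         if best is None or cnt > best[1]:
--             best = (letter, cnt, kids)
--     return best[0], best[1], best[2]
-- ===== Notes on version B (the rewrite author's own statement) =====
-- stated objective: alternative
-- what changed: Replaces the accumulate-into-dict then stable-reverse-sort-and-take-head pipeline by a single left-to-right scan over distinct first letters that computes each letter's name count and kid sum by direct summation and keeps the first letter with a strictly greater name count (matching the stable sort's tie-breaking), with no dict and no sort.
import Mathlib
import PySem

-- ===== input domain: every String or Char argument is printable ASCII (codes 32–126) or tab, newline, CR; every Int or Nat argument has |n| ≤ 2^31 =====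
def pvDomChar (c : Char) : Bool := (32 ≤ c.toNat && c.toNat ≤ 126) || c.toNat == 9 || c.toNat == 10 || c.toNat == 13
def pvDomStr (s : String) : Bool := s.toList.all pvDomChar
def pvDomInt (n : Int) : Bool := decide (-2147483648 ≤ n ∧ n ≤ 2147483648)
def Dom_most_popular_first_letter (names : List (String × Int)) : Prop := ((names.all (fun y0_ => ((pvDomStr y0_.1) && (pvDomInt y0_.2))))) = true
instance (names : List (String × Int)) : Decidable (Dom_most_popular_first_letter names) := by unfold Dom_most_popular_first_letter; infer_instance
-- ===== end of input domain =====

-- B replaces A's accumulate-into-dict / stable-reverse-sort / take-head pipeline by one scan over the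
-- distinct first letters, summing each letter's counts directly and keeping the first strictly-greater one.

-- name[0] in Python is a 1-character string; total form under Pre_ (every name nonempty)
def pvFirst (name : String) : String := String.ofList [(PySem.Str.pyGet? name 0).getD ' ']

-- ===== PORT A =====
def most_popular_first_letter (names : List (String × Int)) : String × Int × Int :=
  let ansDict : PySem.Dict String (Int × Int) :=
    names.foldl (fun d p =>
      let letter := pvFirst p.1
      let amount_names := (d.getD letter (0, 0)).1
      let amount_kids := (d.getD letter (0, 0)).2
      d.insert letter (amount_names + 1, amount_kids + p.2)) PySem.Dict.empty
  let ansList := PySem.List.sorted ansDict.items (fun x => x.2.1) true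
  let h := PySem.List.pyGetD ansList 0 ("", (0, 0))   -- ans_list[0]; IndexError (empty dict) excluded by Pre_
  (h.1, h.2.1, h.2.2)

-- ===== PORT B =====
def most_popular_first_letter_alt (names : List (String × Int)) : String × Int × Int :=
  let step := fun (st : PySem.Set String × Option (String × Int × Int)) (p : String × Int) =>
    let letter := pvFirst p.1
    if letter ∈ st.1 then st
    else
      let seen := PySem.Set.add st.1 letter
      let cnt : Int := ((names.filter (fun q => pvFirst q.1 == letter)).length : Int)
      let kids : Int := ((names.filter (fun q => pvFirst q.1 == letter)).map (·.2)).sum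
      let best := match st.2 with
        | none => some (letter, cnt, kids)
        | some b => if b.2.1 < cnt then some (letter, cnt, kids) else some b
      (seen, best)
  ((names.foldl step (PySem.Set.empty, none)).2).getD ("", 0, 0)   -- best[...]: None only for empty dict, excluded by Pre_

-- ===== PRECONDITION & SPEC =====
-- Pre_ excludes the empty dict and dicts with an empty-string key (Python A raises IndexError on both), and
-- association lists with duplicate keys, which a Python dict cannot represent.
def Pre_most_popular_first_letter (names : List (String × Int)) : Prop :=
  names ≠ [] ∧ (∀ p ∈ names, p.1 ≠ "") ∧ (names.map Prod.fst).Nodup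
instance (names : List (String × Int)) : Decidable (Pre_most_popular_first_letter names) := by unfold Pre_most_popular_first_letter; infer_instance
def pvWitness_most_popular_first_letter : (List (String × Int)) := [("max", 680), ("art", 477), ("mat", 816), ("bgv", 100)]

def Spec_most_popular_first_letter (names : List (String × Int)) (out : String × Int × Int) : Prop := out = most_popular_first_letter_alt names
instance (names : List (String × Int)) (out : String × Int × Int) : Decidable (Spec_most_popular_first_letter names out) := by unfold Spec_most_popular_first_letter; infer_instance

-- ===== CLAIM (what is proved, stated in full; the proofs are below) =====
def Claim_equal_most_popular_first_letter : Prop := ∀ (names : List (String × Int)), Dom_most_popular_first_letter names → Pre_most_popular_first_letter names → Spec_most_popular_first_letter names (most_popular_first_letter names)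

-- ===== LEMMAS AND PROOFS =====

-- shared vocabulary of the proof
def pvCnt (names : List (String × Int)) (l : String) : Int :=
  ((names.filter (fun q => pvFirst q.1 == l)).length : Int)
def pvKids (names : List (String × Int)) (l : String) : Int :=
  ((names.filter (fun q => pvFirst q.1 == l)).map (·.2)).sum
-- one step of the "first strict maximum" scan, and the scan itself
def pvStep {α : Type} (key : α → Int) (b : Option α) (e : α) : Option α :=
  match b with
  | none => some e
  | some m => if key m < key e then some e else some m
def pvScan {α : Type} (key : α → Int) (xs : List α) (b : Option α) : Option α :=
  xs.foldl (pvStep key) b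

lemma pvScan_append_singleton {α : Type} (key : α → Int) (xs : List α) (x : α) (b : Option α) :
    pvScan key (xs ++ [x]) b = pvStep key (pvScan key xs b) x := by
  simp [pvScan, List.foldl_append]

-- A's dict after the loop: value at any key
lemma pv_foldA_getD :
    ∀ (l : List (String × Int)) (d : PySem.Dict String (Int × Int)) (c : String),
    ((l.foldl (fun d p =>
        d.insert (pvFirst p.1) ((d.getD (pvFirst p.1) (0, 0)).1 + 1, (d.getD (pvFirst p.1) (0, 0)).2 + p.2)) d).getD c (0, 0))
    = ((d.getD c (0, 0)).1 + pvCnt l c, (d.getD c (0, 0)).2 + pvKids l c) := by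
  intro l
  induction l with
  | nil => intro d c; simp [pvCnt, pvKids]
  | cons p l ih =>
    intro d c
    simp only [List.foldl_cons, ih]
    by_cases h : pvFirst p.1 = c
    · simp [pvCnt, pvKids, h]
      constructor <;> ring
    · have h' : ¬ (c = pvFirst p.1) := fun e => h e.symm
      simp [pvCnt, pvKids, PySem.Dict.getD_insert, h',
        show (pvFirst p.1 == c) = false by simpa using h]

-- head of Python's stable reverse sort by an Int key = first strict maximum
lemma pv_head_sorted_rev {α : Type} (key : α → Int) (xs : List α) :
    (PySem.List.sorted xs key true).head? = pvScan key xs none := by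
  induction xs using List.reverseRecOn with
  | nil => simp [PySem.List.sorted, pvScan]
  | append_singleton xs x ih =>
    have hs : PySem.List.sorted (xs ++ [x]) key true
        = PySem.List.insertBy (fun a b => decide (key b < key a)) x (PySem.List.sorted xs key true) := by
      simp [PySem.List.sorted, List.foldl_append]
    rw [hs, pvScan_append_singleton, ← ih]
    cases hsx : PySem.List.sorted xs key true with
    | nil => simp [PySem.List.insertBy, pvStep]
    | cons y ys =>
      by_cases h : key y < key x
      · simp [PySem.List.insertBy, pvStep, h]
      · simp [PySem.List.insertBy, pvStep, h]

-- the scan commutes with a key-preserving map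
lemma pv_scan_map {α β : Type} (f : α → β) (kA : α → Int) (kB : β → Int)
    (h : ∀ a, kB (f a) = kA a) (xs : List α) :
    ∀ (b : Option α), pvScan kB (xs.map f) (b.map f) = (pvScan kA xs b).map f := by
  induction xs with
  | nil => intro b; simp [pvScan]
  | cons a xs ih =>
    intro b
    have hstep : pvStep kB (b.map f) (f a) = (pvStep kA b a).map f := by
      cases b with
      | none => simp [pvStep]
      | some m => simp [pvStep, h]; split_ifs <;> simp
    simp only [pvScan, List.map_cons, List.foldl_cons] at *
    rw [hstep, ih]

-- B's loop invariant: seen = distinct letters so far, best = scan over them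
lemma pv_foldB (names : List (String × Int)) :
    ∀ (l : List (String × Int)),
    (l.foldl (fun (st : PySem.Set String × Option (String × Int × Int)) (p : String × Int) =>
      let letter := pvFirst p.1
      if letter ∈ st.1 then st
      else
        let seen := PySem.Set.add st.1 letter
        let cnt : Int := ((names.filter (fun q => pvFirst q.1 == letter)).length : Int)
        let kids : Int := ((names.filter (fun q => pvFirst q.1 == letter)).map (·.2)).sum
        let best := match st.2 with
          | none => some (letter, cnt, kids)
          | some b => if b.2.1 < cnt then some (letter, cnt, kids) else some b
        (seen, best)) (PySem.Set.empty, none))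
    = (PySem.Set.ofList (l.map (fun p => pvFirst p.1)),
       (pvScan (pvCnt names) (PySem.Set.ofList (l.map (fun p => pvFirst p.1))) none).map
         (fun m => (m, pvCnt names m, pvKids names m))) := by
  intro l
  induction l using List.reverseRecOn with
  | nil => simp [pvScan, PySem.Set.ofList, PySem.Set.empty]
  | append_singleton l p ih =>
    rw [List.foldl_append, ih]
    simp only [List.foldl_cons, List.foldl_nil, List.map_append, List.map_cons, List.map_nil,
      PySem.Set.ofList_append_singleton]
    by_cases hmem : pvFirst p.1 ∈ PySem.Set.ofList (l.map (fun p => pvFirst p.1))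
    · rw [PySem.Set.add_of_mem hmem]
      simp [hmem]
    · rw [PySem.Set.add_of_not_mem hmem, pvScan_append_singleton, if_neg hmem]
      cases hb : pvScan (pvCnt names) (PySem.Set.ofList (l.map (fun p => pvFirst p.1))) none with
      | none => simp only [Option.map_none, Option.map_some, pvStep, pvCnt, pvKids]
      | some m =>
        simp only [Option.map_some, pvStep, pvCnt, pvKids]
        split_ifs <;> rfl

-- A's letter -> (name count, kid count) entries, in first-appearance order
def pvLetters (names : List (String × Int)) : PySem.Set String :=
  PySem.Set.ofList (names.map (fun p => pvFirst p.1))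

lemma pv_A_eq (names : List (String × Int)) :
    most_popular_first_letter names
      = match (pvScan (pvCnt names) (pvLetters names) none).map
            (fun m => (m, (pvCnt names m, pvKids names m))) with
        | none => ("", 0, 0)
        | some h => (h.1, h.2.1, h.2.2) := by
  unfold most_popular_first_letter
  simp only []
  have hkeys : (names.foldl (fun d p =>
      d.insert (pvFirst p.1) ((d.getD (pvFirst p.1) (0, 0)).1 + 1, (d.getD (pvFirst p.1) (0, 0)).2 + p.2))
      (PySem.Dict.empty : PySem.Dict String (Int × Int))).keys = pvLetters names := by
    have := PySem.Dict.keys_foldl_insert_key names (fun p => pvFirst p.1)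
      (fun (d : PySem.Dict String (Int × Int)) p => ((d.getD (pvFirst p.1) (0, 0)).1 + 1, (d.getD (pvFirst p.1) (0, 0)).2 + p.2))
      PySem.Dict.empty
    simpa [pvLetters, PySem.Dict.keys_empty, PySem.Set.update_nil_left] using this
  have hnodup : (names.foldl (fun d p =>
      d.insert (pvFirst p.1) ((d.getD (pvFirst p.1) (0, 0)).1 + 1, (d.getD (pvFirst p.1) (0, 0)).2 + p.2))
      (PySem.Dict.empty : PySem.Dict String (Int × Int))).keys.Nodup := by
    exact PySem.Dict.nodup_keys_foldl_insert_key names (fun p => pvFirst p.1)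
      (fun (d : PySem.Dict String (Int × Int)) p => ((d.getD (pvFirst p.1) (0, 0)).1 + 1, (d.getD (pvFirst p.1) (0, 0)).2 + p.2))
      PySem.Dict.empty (by simp [PySem.Dict.keys_empty])
  have hitems : (names.foldl (fun d p =>
      d.insert (pvFirst p.1) ((d.getD (pvFirst p.1) (0, 0)).1 + 1, (d.getD (pvFirst p.1) (0, 0)).2 + p.2))
      (PySem.Dict.empty : PySem.Dict String (Int × Int))).items
      = (pvLetters names).map (fun m => (m, (pvCnt names m, pvKids names m))) := by
    have h3 := PySem.Dict.items_eq_map_keys _ hnodup ((0 : Int), (0 : Int))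
    rw [h3, hkeys]
    refine List.map_congr_left (fun k hk => ?_)
    rw [pv_foldA_getD names (PySem.Dict.empty : PySem.Dict String (Int × Int)) k]
    simp [PySem.Dict.getD_empty]
  rw [hitems]
  have hhead := pv_head_sorted_rev (fun x => x.2.1)
    ((pvLetters names).map (fun m => (m, (pvCnt names m, pvKids names m))))
  have hmap := pv_scan_map (fun m => (m, (pvCnt names m, pvKids names m)))
    (pvCnt names) (fun x => x.2.1) (fun a => rfl) (pvLetters names) none
  simp only [Option.map_none] at hmap
  rw [hmap] at hhead
  cases hb : (pvScan (pvCnt names) (pvLetters names) none) with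
  | none =>
    rw [hb] at hhead
    simp only [Option.map_none] at hhead ⊢
    have : PySem.List.sorted ((pvLetters names).map (fun m => (m, (pvCnt names m, pvKids names m))))
        (fun x => x.2.1) true = [] := List.head?_eq_none_iff.mp hhead
    rw [this]
    simp [PySem.List.pyGetD_zero]
  | some m =>
    rw [hb] at hhead
    simp only [Option.map_some] at hhead ⊢
    cases hsl : PySem.List.sorted ((pvLetters names).map (fun m => (m, (pvCnt names m, pvKids names m))))
        (fun x => x.2.1) true with
    | nil => rw [hsl] at hhead; simp at hhead
    | cons y t =>
      rw [hsl] at hhead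
      simp only [List.head?_cons, Option.some.injEq] at hhead
      subst hhead
      simp [PySem.List.pyGetD_zero_cons]

lemma pv_B_eq (names : List (String × Int)) :
    most_popular_first_letter_alt names
      = match (pvScan (pvCnt names) (pvLetters names) none).map
            (fun m => (m, (pvCnt names m, pvKids names m))) with
        | none => ("", 0, 0)
        | some h => (h.1, h.2.1, h.2.2) := by
  unfold most_popular_first_letter_alt
  simp only []
  rw [pv_foldB names names]
  cases hb : (pvScan (pvCnt names) (pvLetters names) none) with
  | none => simp [pvLetters] at hb ⊢; rw [hb]; rfl
  | some m => simp [pvLetters] at hb ⊢; rw [hb]; rfl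

-- ===== VERDICT (by name: the statement is the Claim_ definition above) =====
theorem most_popular_first_letter_spec : Claim_equal_most_popular_first_letter := by
  intro names _ _
  unfold Spec_most_popular_first_letter
  rw [pv_A_eq, pv_B_eq]
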